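-- pv_equiv track=rewrite | github.com/rhythm-semwal/DS-Algo | Queues/first non repeating character.py | solve
-- ===== SOURCE A (Python) =====
-- def solve(A):
--     ans = ""
--     hash_set = dict()
--
--     queue = list()
--
--     for i in range(len(A)):
--         if A[i] not in hash_set:
--             hash_set[A[i]] = 1
--             queue.append(A[i])
--         else:
--             hash_set[A[i]] += 1
--
--         if not queue:
--             ans += '#'
--
--         elif hash_set[queue[0]] == 1:
--             ans += queue[0]
--
--         else:
--             while queue and hash_set[queue[0]] != 1:
--                 queue.pop(0)
--
--             if queue:
--                 ans += queue[0]
--             else: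
--                 ans += '#'
--
--     return ans
-- ===== SOURCE B (Python) =====
-- def solve(A):
--     counts = {}
--     cands = []  # chars whose count is exactly 1, in first-occurrence order
--     out = []
--     for c in A:
--         n = counts.get(c, 0) + 1
--         counts[c] = n
--         if n == 1:
--             cands.append(c)
--         elif n == 2:
--             cands.remove(c)
--         out.append(cands[0] if cands else '#')
--     return ''.join(out)
-- ===== Notes on version B (the rewrite author's own statement) =====
-- stated objective: simpler
-- what changed: Replaces A's lazy queue of stale heads (inner while-pop loop plus a three-branch output) with an eagerly maintained list of count-1 candidates (append at first occurrence, remove at the second), so each step's answer is simply the list head.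
import Mathlib
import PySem

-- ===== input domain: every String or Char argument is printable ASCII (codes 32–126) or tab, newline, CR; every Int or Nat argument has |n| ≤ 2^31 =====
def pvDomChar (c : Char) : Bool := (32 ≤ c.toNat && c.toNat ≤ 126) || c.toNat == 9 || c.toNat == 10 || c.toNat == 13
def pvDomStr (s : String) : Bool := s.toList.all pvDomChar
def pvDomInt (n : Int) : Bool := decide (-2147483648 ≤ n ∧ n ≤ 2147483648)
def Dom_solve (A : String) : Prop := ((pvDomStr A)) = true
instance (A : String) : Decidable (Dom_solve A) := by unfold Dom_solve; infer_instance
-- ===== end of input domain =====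

-- B replaces A's lazy queue (stale heads removed by an inner while-pop loop, three-way
-- output branch) with an eagerly maintained list of count-1 candidates, so each step's
-- answer is simply the list head; objective: simpler.

-- ===== PORT A =====
-- the inner `while queue and hash_set[queue[0]] != 1: queue.pop(0)` loop
def popLoop (h : PySem.Dict Char Int) : List Char → List Char
  | [] => []
  | x :: xs => if h.getD x 0 != 1 then popLoop h xs else x :: xs

-- second half of A's loop body: the character appended to ans, and the queue it leaves
def emitA (h : PySem.Dict Char Int) (q : List Char) : Char × List Char :=
  match q with
  | [] => ('#', [])
  | q0 :: _ =>
    if h.getD q0 0 == 1 then (q0, q)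
    else
      match popLoop h q with
      | [] => ('#', [])
      | r :: t => (r, r :: t)

-- isOne iteration of A's `for i in range(len(A))` loop; state = (ans, hash_set, queue)
def solveStep (st : List Char × PySem.Dict Char Int × List Char) (c : Char) :
    List Char × PySem.Dict Char Int × List Char :=
  let ans := st.1
  let hs0 := st.2.1
  let q0 := st.2.2
  let hs := if hs0.contains c = false then hs0.insert c 1
            else hs0.insert c (hs0.getD c 0 + 1)
  let q := if hs0.contains c = false then q0 ++ [c] else q0
  let e := emitA hs q
  (ans ++ [e.1], hs, e.2)

def solve (A : String) : String :=
  String.mk (A.toList.foldl solveStep ([], PySem.Dict.empty, [])).1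

-- ===== PORT B =====
-- isOne iteration of B's loop; state = (out, counts, cands).
-- `cands.remove(c)` is `List.erase` (remove first occurrence): c is present in cands
-- whenever that branch runs, so Python's ValueError is unreachable.
def solveAltStep (st : List Char × PySem.Dict Char Int × List Char) (c : Char) :
    List Char × PySem.Dict Char Int × List Char :=
  let out := st.1
  let counts := st.2.1
  let cands0 := st.2.2
  let n := counts.getD c 0 + 1
  let cands :=
    if n == 1 then cands0 ++ [c]
    else if n == 2 then cands0.erase c
    else cands0
  (out ++ [(cands.head?).getD '#'], counts.insert c n, cands)

def solve_alt (A : String) : String :=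
  String.mk (A.toList.foldl solveAltStep ([], PySem.Dict.empty, [])).1

-- ===== PRECONDITION & SPEC =====
def Spec_solve (A : String) (out : String) : Prop := out = solve_alt A
instance (A : String) (out : String) : Decidable (Spec_solve A out) := by unfold Spec_solve; infer_instance

-- ===== CLAIM (what is proved, stated in full; the proofs are below) =====
def Claim_equal_solve : Prop := ∀ (A : String), Dom_solve A → Spec_solve A (solve A)

-- ===== LEMMAS AND PROOFS =====

-- "x is currently a non-repeated character"
def isOne (h : PySem.Dict Char Int) (x : Char) : Bool := h.getD x 0 == 1

-- the simulation invariant between A's (hash_set, queue) and B's (counts, cands)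
def SimInv (h : PySem.Dict Char Int) (q cands : List Char) : Prop :=
  cands = q.filter (isOne h) ∧ (∀ x ∈ q, (h.get? x).isSome) ∧ q.Nodup ∧
    (∀ x v, h.get? x = some v → 1 ≤ v)

lemma popLoop_filter (h : PySem.Dict Char Int) :
    ∀ q : List Char, (popLoop h q).filter (isOne h) = q.filter (isOne h) := by
  intro q
  induction q with
  | nil => rfl
  | cons x xs ih =>
    by_cases hx : h.getD x 0 = 1
    · simp [popLoop, List.filter_cons, isOne, hx]
    · simp [popLoop, List.filter_cons, isOne, hx, ih]

lemma popLoop_head? (h : PySem.Dict Char Int) :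
    ∀ q : List Char, (popLoop h q).head? = (q.filter (isOne h)).head? := by
  intro q
  induction q with
  | nil => rfl
  | cons x xs ih =>
    by_cases hx : h.getD x 0 = 1
    · simp [popLoop, hx, List.filter_cons, isOne]
    · simp [popLoop, hx, List.filter_cons, isOne, ih]

lemma popLoop_sublist (h : PySem.Dict Char Int) :
    ∀ q : List Char, (popLoop h q).Sublist q := by
  intro q
  induction q with
  | nil => simp [popLoop]
  | cons x xs ih =>
    by_cases hx : h.getD x 0 = 1
    · simp [popLoop, hx]
    · simp only [popLoop, if_neg, bne_iff_ne, ne_eq, hx, not_false_eq_true, if_pos]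
      exact ih.cons x

lemma emitA_fst (h : PySem.Dict Char Int) (q : List Char) :
    (emitA h q).1 = ((q.filter (isOne h)).head?).getD '#' := by
  cases q with
  | nil => rfl
  | cons q0 qs =>
    by_cases h0 : (h.getD q0 0 == 1) = true
    · simp [emitA, h0, List.filter_cons, isOne]
    · have hp := popLoop_head? h (q0 :: qs)
      simp only [emitA, h0, if_neg, Bool.not_eq_true]
      cases hq : popLoop h (q0 :: qs) with
      | nil => rw [hq] at hp; simp [h0, ← hp]
      | cons r t => rw [hq] at hp; simp [h0, ← hp]

lemma emitA_snd_filter (h : PySem.Dict Char Int) (q : List Char) :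
    (emitA h q).2.filter (isOne h) = q.filter (isOne h) := by
  cases q with
  | nil => rfl
  | cons q0 qs =>
    by_cases h0 : (h.getD q0 0 == 1) = true
    · simp [emitA, h0]
    · have hp := popLoop_filter h (q0 :: qs)
      simp only [emitA, h0]
      cases hq : popLoop h (q0 :: qs) with
      | nil => rw [hq] at hp; simp [h0, ← hp]
      | cons r t => rw [hq] at hp; simp [h0, ← hp]

lemma emitA_snd_sublist (h : PySem.Dict Char Int) (q : List Char) :
    (emitA h q).2.Sublist q := by
  cases q with
  | nil => simp [emitA]
  | cons q0 qs =>
    by_cases h0 : (h.getD q0 0 == 1) = true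
    · simp [emitA, h0]
    · have hp := popLoop_sublist h (q0 :: qs)
      simp only [emitA, h0]
      cases hq : popLoop h (q0 :: qs) with
      | nil => simp
      | cons r t => rw [hq] at hp; simpa [h0] using hp

-- inserting a key not in q does not change q's filter
lemma filter_insert_not_mem (h : PySem.Dict Char Int) (c : Char) (v : Int)
    (q : List Char) (hc : c ∉ q) :
    q.filter (isOne (h.insert c v)) = q.filter (isOne h) := by
  apply List.filter_congr
  intro x hx
  have hne : x ≠ c := fun he => hc (he ▸ hx)
  simp [isOne, PySem.Dict.getD_insert, hne]

-- second occurrence: the filtered queue loses exactly c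
lemma filter_insert_kill (h : PySem.Dict Char Int) (c : Char) (v : Int)
    (hv : (v == 1) = false) (hc : isOne h c = true) :
    ∀ q : List Char, q.Nodup →
      q.filter (isOne (h.insert c v)) = (q.filter (isOne h)).erase c := by
  intro q
  induction q with
  | nil => intro _; rfl
  | cons x xs ih =>
    intro hnd
    have hx : x ∉ xs := (List.nodup_cons.mp hnd).1
    have hxs : xs.Nodup := (List.nodup_cons.mp hnd).2
    by_cases hxc : x = c
    · subst hxc
      simp only [isOne] at hc
      simp [List.filter_cons, isOne, PySem.Dict.getD_insert, hv, hc,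
        filter_insert_not_mem h x v xs hx]
    · have h1 : isOne (h.insert c v) x = isOne h x := by
        simp [isOne, PySem.Dict.getD_insert, hxc]
      by_cases hox : isOne h x = true
      · simp [List.filter_cons, h1, hox, ih hxs,
          List.erase_cons_tail, (by simpa using hxc : ¬ (x == c) = true)]
      · simp only [Bool.not_eq_true] at hox
        simp [List.filter_cons, h1, hox, ih hxs]

-- third or later occurrence: the filter is unchanged
lemma filter_insert_big (h : PySem.Dict Char Int) (c : Char) (v : Int)
    (hv : (v == 1) = false) (hc : isOne h c = false) (q : List Char) :
    q.filter (isOne (h.insert c v)) = q.filter (isOne h) := by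
  apply List.filter_congr
  intro x _
  by_cases hxc : x = c
  · subst hxc
    simp only [isOne, beq_iff_eq] at hc ⊢
    simp [PySem.Dict.getD_insert]
    simp only [beq_eq_false_iff_ne, ne_eq] at hv
    simp [hv]
    intro h'
    exact absurd h' (by simpa using hc)
  · simp [isOne, PySem.Dict.getD_insert, hxc]

-- dict-side invariant parts after isOne insert of a positive count
lemma inv_dict_insert (h : PySem.Dict Char Int) (c : Char) (v : Int) (hv : 1 ≤ v)
    (q : List Char) (hmem : ∀ x ∈ q, (h.get? x).isSome)
    (hval : ∀ x w, h.get? x = some w → 1 ≤ w) :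
    (∀ x ∈ q ++ [c], ((h.insert c v).get? x).isSome) ∧
      (∀ x w, (h.insert c v).get? x = some w → 1 ≤ w) := by
  constructor
  · intro x hx
    rcases eq_or_ne x c with rfl | hne
    · simp [PySem.Dict.get?_insert_self]
    · rw [PySem.Dict.get?_insert_of_ne h v hne]
      rcases List.mem_append.mp hx with h1 | h1
      · exact hmem x h1
      · simp at h1; exact absurd h1 hne
  · intro x w hxw
    rcases eq_or_ne x c with rfl | hne
    · rw [PySem.Dict.get?_insert_self] at hxw
      cases hxw; exact hv
    · rw [PySem.Dict.get?_insert_of_ne h v hne] at hxw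
      exact hval x w hxw

-- shared tail of the simulation step: once the dicts agree and cands' is the new filter
lemma end_sim (h' : PySem.Dict Char Int) (q' cands' : List Char)
    (hf : cands' = q'.filter (isOne h'))
    (hm : ∀ x ∈ q', (h'.get? x).isSome) (hn : q'.Nodup)
    (hv : ∀ x v, h'.get? x = some v → 1 ≤ v) :
    (emitA h' q').1 = (cands'.head?).getD '#' ∧ SimInv h' (emitA h' q').2 cands' := by
  refine ⟨by rw [emitA_fst, hf], ?_, ?_, ?_, hv⟩
  · rw [hf, ← emitA_snd_filter]
  · intro x hx
    exact hm x ((emitA_snd_sublist h' q').subset hx)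
  · exact hn.sublist (emitA_snd_sublist h' q')

lemma step_sim (c : Char) (ans : List Char) (h : PySem.Dict Char Int)
    (q cands : List Char) (hI : SimInv h q cands) :
    (solveStep (ans, h, q) c).1 = (solveAltStep (ans, h, cands) c).1 ∧
    (solveAltStep (ans, h, cands) c).2.1 = (solveStep (ans, h, q) c).2.1 ∧
    SimInv (solveStep (ans, h, q) c).2.1 (solveStep (ans, h, q) c).2.2
        (solveAltStep (ans, h, cands) c).2.2 := by
  obtain ⟨hcf, hmem, hnd, hval⟩ := hI
  by_cases hc : h.contains c = true
  · -- c already counted: A leaves the queue alone, B removes c at its 2nd occurrence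
    have hks : (h.get? c).isSome := by
      rw [← PySem.Dict.contains_eq_isSome_get?]; exact hc
    obtain ⟨k, hk⟩ := Option.isSome_iff_exists.mp hks
    have hk1 : 1 ≤ k := hval c k hk
    have hgd : h.getD c 0 = k := PySem.Dict.getD_of_get?_eq_some h 0 hk
    have hA : solveStep (ans, h, q) c =
        (ans ++ [(emitA (h.insert c (k + 1)) q).1], h.insert c (k + 1),
          (emitA (h.insert c (k + 1)) q).2) := by
      simp [solveStep, hc, hgd]
    have hdi := inv_dict_insert h c (k + 1) (by omega) q hmem hval
    by_cases hk2 : k = 1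
    · subst hk2
      rw [(by norm_num : (1:ℤ) + 1 = 2)] at hA hdi
      have hf : q.filter (isOne (h.insert c 2)) = cands.erase c := by
        rw [hcf]
        exact filter_insert_kill h c 2 (by decide) (by simp [isOne, hgd]) q hnd
      have hB : solveAltStep (ans, h, cands) c =
          (ans ++ [((cands.erase c).head?).getD '#'], h.insert c 2, cands.erase c) := by
        simp [solveAltStep, hgd]
      obtain ⟨he1, he2⟩ := end_sim (h.insert c 2) q (cands.erase c) hf.symm
        (fun x hx => hdi.1 x (List.mem_append_left _ hx)) hnd hdi.2
      rw [hA, hB]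
      exact ⟨by rw [he1], rfl, he2⟩
    · have hf : q.filter (isOne (h.insert c (k + 1))) = cands := by
        rw [hcf]
        exact filter_insert_big h c (k + 1) (by simp; omega)
          (by simp [isOne, hgd]; omega) q
      have hB : solveAltStep (ans, h, cands) c =
          (ans ++ [(cands.head?).getD '#'], h.insert c (k + 1), cands) := by
        simp [solveAltStep, hgd, (by simp; omega : ¬ ((k + 1 : Int) == 1) = true),
          (by simp; omega : ¬ ((k + 1 : Int) == 2) = true)]
      obtain ⟨he1, he2⟩ := end_sim (h.insert c (k + 1)) q cands hf.symm
        (fun x hx => hdi.1 x (List.mem_append_left _ hx)) hnd hdi.2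
      rw [hA, hB]
      exact ⟨by rw [he1], rfl, he2⟩
  · -- first occurrence of c: both append it
    have hcn : h.contains c = false := by simpa using hc
    have hg0 : h.get? c = none := by
      rw [PySem.Dict.get?_eq_none_iff_contains]; exact hcn
    have hgd : h.getD c 0 = 0 := by
      rw [PySem.Dict.getD_eq_get?_getD, hg0]; rfl
    have hcq : c ∉ q := fun hx => by
      have := hmem c hx; rw [hg0] at this; simp at this
    have hA : solveStep (ans, h, q) c =
        (ans ++ [(emitA (h.insert c 1) (q ++ [c])).1], h.insert c 1,
          (emitA (h.insert c 1) (q ++ [c])).2) := by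
      simp [solveStep, hcn]
    have hB : solveAltStep (ans, h, cands) c =
        (ans ++ [((cands ++ [c]).head?).getD '#'], h.insert c 1, cands ++ [c]) := by
      simp [solveAltStep, hgd]
    have hf : (q ++ [c]).filter (isOne (h.insert c 1)) = cands ++ [c] := by
      rw [List.filter_append, filter_insert_not_mem h c 1 q hcq, ← hcf]
      simp [isOne, PySem.Dict.getD_insert]
    have hdi := inv_dict_insert h c 1 (by omega) q hmem hval
    have hnd' : (q ++ [c]).Nodup := by
      simp [List.nodup_append, hnd]
      exact fun a ha hac => hcq (hac ▸ ha)
    obtain ⟨he1, he2⟩ := end_sim (h.insert c 1) (q ++ [c]) (cands ++ [c]) hf.symm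
      hdi.1 hnd' hdi.2
    rw [hA, hB]
    exact ⟨by rw [he1], rfl, he2⟩

lemma loop_sim : ∀ (cs : List Char) (ans : List Char) (h : PySem.Dict Char Int)
    (q cands : List Char), SimInv h q cands →
    (cs.foldl solveStep (ans, h, q)).1 = (cs.foldl solveAltStep (ans, h, cands)).1 := by
  intro cs
  induction cs with
  | nil => intro ans h q cands _; rfl
  | cons c cs ih =>
    intro ans h q cands hI
    obtain ⟨h1, h2, h3⟩ := step_sim c ans h q cands hI
    simp only [List.foldl_cons]
    have hsB : solveAltStep (ans, h, cands) c =
        ((solveStep (ans, h, q) c).1, (solveStep (ans, h, q) c).2.1,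
          (solveAltStep (ans, h, cands) c).2.2) := by
      rw [h1, ← h2]
    rw [hsB]
    exact ih (solveStep (ans, h, q) c).1 (solveStep (ans, h, q) c).2.1
      (solveStep (ans, h, q) c).2.2 (solveAltStep (ans, h, cands) c).2.2 h3

-- ===== VERDICT (by name: the statement is the Claim_ definition above) =====
theorem solve_spec : Claim_equal_solve := by
  intro A _
  unfold Spec_solve solve solve_alt
  rw [loop_sim A.toList [] PySem.Dict.empty [] []]
  exact ⟨rfl, by simp, List.nodup_nil, by simp [PySem.Dict.get?_empty]⟩
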